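-- pv_equiv track=rewrite | github.com/google/airdialogue_model | self_play.py | utterance_to_dialogue
-- ===== SOURCE A (Python) =====
-- def utterance_to_dialogue(utt):
--     stack = ""
--     dialogue = []
--     for s in utt:
--         if s == "<t1>" or s == "<t2>":
--             if stack:
--                 dialogue.append(stack)
--                 stack = ""
--             stack += "customer:" if s == "<t1>" else "agent:"
--         elif s == "<eod>":
--             break
--         else:
--             stack += " " + s
--     if stack:
--         dialogue.append(stack)
--     return dialogue
-- ===== SOURCE B (Python) =====
-- def _split(toks):
--     # tokens before the first marker/<eod>; remainder starting at the marker,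
--     # or [] once <eod> (or the end) is reached
--     for i, t in enumerate(toks):
--         if t == "<t1>" or t == "<t2>":
--             return toks[:i], toks[i:]
--         if t == "<eod>":
--             return toks[:i], []
--     return toks, []
--
-- def _render(toks):
--     return "".join(" " + t for t in toks)
--
-- def utterance_to_dialogue(utt):
--     body, rest = _split(utt)
--     dialogue = [_render(body)] if body else []
--     while rest:
--         marker, tail = rest[0], rest[1:]
--         body, rest = _split(tail)
--         prefix = "customer:" if marker == "<t1>" else "agent:"
--         dialogue.append(prefix + _render(body))
--     return dialogue
-- ===== Notes on version B (the rewrite author's own statement) =====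
-- stated objective: alternative
-- what changed: Replaces A's single-pass state machine that accumulates each turn character-by-character in a string 'stack' with a span-splitting decomposition: cut at <eod>, split the tokens into marker-led segments, and render each segment independently.
import Mathlib
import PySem

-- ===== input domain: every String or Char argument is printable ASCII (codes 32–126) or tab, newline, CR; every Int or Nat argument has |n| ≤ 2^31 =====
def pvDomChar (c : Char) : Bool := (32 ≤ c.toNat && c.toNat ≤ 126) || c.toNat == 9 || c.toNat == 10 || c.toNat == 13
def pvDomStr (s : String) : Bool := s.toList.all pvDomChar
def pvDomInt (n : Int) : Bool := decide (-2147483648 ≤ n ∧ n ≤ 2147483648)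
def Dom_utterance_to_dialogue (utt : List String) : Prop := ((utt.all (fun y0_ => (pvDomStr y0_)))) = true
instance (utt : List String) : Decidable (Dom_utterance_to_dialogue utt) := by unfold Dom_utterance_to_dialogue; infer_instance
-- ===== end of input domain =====

-- B replaces A's character-accumulating state machine by span-splitting the token
-- list into marker-led segments and rendering each segment (objective: alternative decomposition).

-- ===== PORT A =====
-- the `for s in utt` loop: state (stack, dialogue); `break` on "<eod>" returns the state
def pvLoopA : List String → String → List String → String × List String
  | [], stack, dialogue => (stack, dialogue)
  | s :: rest, stack, dialogue =>
    if s = "<t1>" ∨ s = "<t2>" then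
      let stack1 := if stack ≠ "" then "" else stack
      let dialogue1 := if stack ≠ "" then dialogue ++ [stack] else dialogue
      pvLoopA rest (stack1 ++ (if s = "<t1>" then "customer:" else "agent:")) dialogue1
    else if s = "<eod>" then (stack, dialogue)
    else pvLoopA rest (stack ++ " " ++ s) dialogue

def utterance_to_dialogue (utt : List String) : List String :=
  let p := pvLoopA utt "" []
  -- trailing `if stack: dialogue.append(stack)`
  if p.1 ≠ "" then p.2 ++ [p.1] else p.2

-- ===== PORT B =====
-- _split: tokens before the first marker/<eod>; remainder starting at the marker, or [] after <eod>/end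
def pvSplitSeg : List String → List String × List String
  | [] => ([], [])
  | t :: rest =>
    if t = "<t1>" ∨ t = "<t2>" then ([], t :: rest)
    else if t = "<eod>" then ([], [])
    else
      let p := pvSplitSeg rest
      (t :: p.1, p.2)

-- _render: "".join(" " + t for t in toks)
def pvRender : List String → String
  | [] => ""
  | t :: ts => " " ++ t ++ pvRender ts

-- used by pvTurns for termination
theorem pvSplitSeg_snd_length (ts : List String) : (pvSplitSeg ts).2.length ≤ ts.length := by
  induction ts with
  | nil => simp [pvSplitSeg]
  | cons t rest ih =>
    simp only [pvSplitSeg]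
    split_ifs <;> simp <;> omega

-- the `while rest:` loop of Source B as structural recursion on rest
def pvTurns : List String → List String
  | [] => []
  | m :: tail =>
    let p := pvSplitSeg tail
    ((if m = "<t1>" then "customer:" else "agent:") ++ pvRender p.1) :: pvTurns p.2
termination_by l => l.length
decreasing_by
  simpa using Nat.lt_succ_of_le (pvSplitSeg_snd_length tail)

def utterance_to_dialogue_alt (utt : List String) : List String :=
  let p := pvSplitSeg utt
  (if p.1 ≠ [] then [pvRender p.1] else []) ++ pvTurns p.2

-- ===== PRECONDITION & SPEC =====
def Spec_utterance_to_dialogue (utt : List String) (out : List String) : Prop := out = utterance_to_dialogue_alt utt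
instance (utt : List String) (out : List String) : Decidable (Spec_utterance_to_dialogue utt out) := by unfold Spec_utterance_to_dialogue; infer_instance

-- ===== CLAIM (what is proved, stated in full; the proofs are below) =====
def Claim_equal_utterance_to_dialogue : Prop := ∀ (utt : List String), Dom_utterance_to_dialogue utt → Spec_utterance_to_dialogue utt (utterance_to_dialogue utt)

-- ===== LEMMAS AND PROOFS =====

theorem pv_append_left_ne_empty (s t : String) (h : s ≠ "") : s ++ t ≠ "" := by
  intro he
  apply h
  have hl := congrArg String.toList he
  simp at hl
  exact hl.1

theorem pvRender_ne_empty (ts : List String) (h : ts ≠ []) : pvRender ts ≠ "" := by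
  cases ts with
  | nil => exact absurd rfl h
  | cons t ts =>
    simp only [pvRender]
    rw [String.append_assoc]
    exact pv_append_left_ne_empty _ _ (by decide)

def pvSegRHS (stack : String) (utt : List String) : List String :=
  (if stack ++ pvRender (pvSplitSeg utt).1 ≠ "" then [stack ++ pvRender (pvSplitSeg utt).1] else [])
    ++ pvTurns (pvSplitSeg utt).2

theorem pvLoopA_eq (utt : List String) : ∀ (stack : String) (d : List String),
    (if (pvLoopA utt stack d).1 ≠ "" then (pvLoopA utt stack d).2 ++ [(pvLoopA utt stack d).1]
     else (pvLoopA utt stack d).2) = d ++ pvSegRHS stack utt := by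
  induction utt with
  | nil =>
    intro stack d
    simp only [pvLoopA, pvSegRHS, pvSplitSeg, pvRender, pvTurns, String.append_empty]
    split_ifs <;> simp
  | cons s rest ih =>
    intro stack d
    by_cases hm : s = "<t1>" ∨ s = "<t2>"
    · have hpre : (if s = "<t1>" then "customer:" else "agent:") ≠ "" := by
        split_ifs <;> decide
      simp only [pvLoopA, if_pos hm, pvSegRHS, pvSplitSeg, if_pos hm, String.append_empty,
        pvTurns]
      by_cases hs : stack = ""
      · simp only [hs, ne_eq, not_true_eq_false, if_false, ite_self]
        rw [ih]
        simp only [pvSegRHS, String.empty_append]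
        rw [if_pos (pv_append_left_ne_empty _ _ hpre)]
        simp [pvRender]
      · simp only [ne_eq, hs, not_false_eq_true, if_true, String.empty_append]
        rw [ih]
        simp only [pvSegRHS]
        rw [if_pos (pv_append_left_ne_empty _ _ hpre)]
        simp [pvRender, hs]
    · by_cases he : s = "<eod>"
      · simp only [pvLoopA, if_neg hm, if_pos he, pvSegRHS, pvSplitSeg, if_neg hm, if_pos he,
          pvRender, String.append_empty, pvTurns]
        split_ifs <;> simp
      · simp only [pvLoopA, if_neg hm, if_neg he]
        rw [ih]
        simp only [pvSegRHS, pvSplitSeg, if_neg hm, if_neg he, pvRender]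
        have : stack ++ " " ++ s ++
            pvRender (pvSplitSeg rest).1 = stack ++ (" " ++ s ++ pvRender (pvSplitSeg rest).1) := by
          simp [String.append_assoc]
        rw [this]

-- ===== VERDICT (by name: the statement is the Claim_ definition above) =====
theorem utterance_to_dialogue_spec : Claim_equal_utterance_to_dialogue := by
  intro utt _
  unfold Spec_utterance_to_dialogue utterance_to_dialogue utterance_to_dialogue_alt
  rw [pvLoopA_eq]
  simp only [pvSegRHS, String.empty_append, List.nil_append]
  by_cases h : (pvSplitSeg utt).1 = []
  · simp [h, pvRender]
  · rw [if_pos (pvRender_ne_empty _ h), if_pos h]
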